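-- pv_equiv track=rewrite | github.com/terzo-ai/nebula-e2e-tests | lib/report.py | _mask_url_params
-- ===== SOURCE A (Python) =====
-- _SENSITIVE_URL_PARAMS = {
--     "sig", "sv", "se", "sp", "srt", "ss", "spr", "st",
--     "skoid", "sktid", "skt", "ske", "sks", "skv",
-- }
--
-- def _mask_url_params(url: str) -> str:
--     if "?" not in url:
--         return url
--     head, _, qs = url.partition("?")
--     masked_parts: list[str] = []
--     for part in qs.split("&"):
--         name, eq, value = part.partition("=")
--         if eq and value and name.lower() in _SENSITIVE_URL_PARAMS:
--             masked_parts.append(f"{name}=***")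
--         else:
--             masked_parts.append(part)
--     return head + "?" + "&".join(masked_parts)
-- ===== SOURCE B (Python) =====
-- _SENSITIVE_URL_PARAMS = {
--     "sig", "sv", "se", "sp", "srt", "ss", "spr", "st",
--     "skoid", "sktid", "skt", "ske", "sks", "skv",
-- }
--
-- def _mask_url_params(url: str) -> str:
--     head, sep, qs = url.partition("?")
--     if not sep:
--         return url
--     return head + "?" + _mask_qs(qs)
--
-- def _mask_qs(qs: str) -> str:
--     part, amp, rest = qs.partition("&")
--     name, eq, value = part.partition("=")
--     if eq and value and name.lower() in _SENSITIVE_URL_PARAMS: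
--         part = name + "=***"
--     return part + amp + (_mask_qs(rest) if amp else "")
-- ===== Notes on version B (the rewrite author's own statement) =====
-- stated objective: alternative
-- what changed: B replaces A's split-the-query-string / accumulate-a-list-of-parts / join pipeline by a direct recursion that repeatedly partitions the query string at the next ampersand separator, masking each parameter and emitting output as it goes, with no intermediate list.
import Mathlib
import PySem

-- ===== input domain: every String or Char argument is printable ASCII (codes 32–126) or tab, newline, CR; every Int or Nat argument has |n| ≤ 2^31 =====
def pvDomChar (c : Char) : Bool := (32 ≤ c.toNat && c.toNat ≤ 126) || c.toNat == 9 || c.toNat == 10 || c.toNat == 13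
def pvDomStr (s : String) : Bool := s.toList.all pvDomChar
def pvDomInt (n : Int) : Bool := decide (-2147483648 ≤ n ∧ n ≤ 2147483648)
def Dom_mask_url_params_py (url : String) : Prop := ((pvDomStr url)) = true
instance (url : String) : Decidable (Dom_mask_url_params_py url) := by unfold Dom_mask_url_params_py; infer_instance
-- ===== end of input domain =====

-- B re-implements A's split/list/join loop over the query string as a direct recursion on
-- '&'-partition (alternative decomposition, same cost); the return values agree on every input.

-- str.partition(sep) for a ONE-character separator, exact: scans left to right for the first
-- occurrence of c and returns (before, found?, after); used by both ports (both Pythons call it).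
def pvPartition (c : Char) : List Char → (List Char × Bool × List Char)
  | [] => ([], false, [])
  | x :: xs =>
    if x = c then ([], true, xs)
    else
      let r := pvPartition c xs
      (x :: r.1, r.2.1, r.2.2)

-- the module constant _SENSITIVE_URL_PARAMS (a Python set of strings)
def pvSensitive : PySem.Set (List Char) :=
  PySem.Set.ofList
    ["sig".toList, "sv".toList, "se".toList, "sp".toList, "srt".toList, "ss".toList,
     "spr".toList, "st".toList, "skoid".toList, "sktid".toList, "skt".toList,
     "ske".toList, "sks".toList, "skv".toList]

-- ===== PORT A =====
def mask_url_params_py (url : String) : String :=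
  if PySem.Str.isIn "?" url = false then url
  else
    let p := pvPartition '?' url.toList
    let head := p.1
    let qs := p.2.2
    let maskedParts := (PySem.Chars.splitOn qs ['&']).foldl
      (fun acc part =>
        let q := pvPartition '=' part
        if q.2.1 && !q.2.2.isEmpty && PySem.Set.contains pvSensitive (PySem.Chars.lower q.1) then
          acc ++ [q.1 ++ ['=', '*', '*', '*']]
        else
          acc ++ [part]) []
    String.mk (head ++ '?' :: PySem.Chars.join ['&'] maskedParts)

-- ===== PORT B =====
-- termination helper for pvMaskQs: the remainder after a found separator is strictly shorter
theorem pvPartition_rest_lt (c : Char) (l : List Char)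
    (h : (pvPartition c l).2.1 = true) : (pvPartition c l).2.2.length < l.length := by
  induction l with
  | nil => simp [pvPartition] at h
  | cons x xs ih =>
    by_cases hx : x = c
    · simp [pvPartition, hx]
    · simp only [pvPartition, if_neg hx] at h ⊢
      exact Nat.lt_succ_of_lt (ih h)

-- _mask_qs from Source B: recursion on the partition at the next '&'
def pvMaskQs (qs : List Char) : List Char :=
  let p := pvPartition '&' qs
  let q := pvPartition '=' p.1
  let part :=
    if q.2.1 && !q.2.2.isEmpty && PySem.Set.contains pvSensitive (PySem.Chars.lower q.1) then
      q.1 ++ ['=', '*', '*', '*']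
    else p.1
  part ++ (if h : p.2.1 = true then '&' :: pvMaskQs p.2.2 else [])
termination_by qs.length
decreasing_by exact pvPartition_rest_lt '&' qs h

def mask_url_params_py_alt (url : String) : String :=
  let p := pvPartition '?' url.toList
  if p.2.1 = false then url
  else String.mk (p.1 ++ '?' :: pvMaskQs p.2.2)

-- ===== PRECONDITION & SPEC =====
def Spec_mask_url_params_py (url : String) (out : String) : Prop := out = mask_url_params_py_alt url
instance (url : String) (out : String) : Decidable (Spec_mask_url_params_py url out) := by unfold Spec_mask_url_params_py; infer_instance

-- ===== CLAIM (what is proved, stated in full; the proofs are below) =====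
def Claim_equal_mask_url_params_py : Prop := ∀ (url : String), Dom_mask_url_params_py url → Spec_mask_url_params_py url (mask_url_params_py url)

-- ===== LEMMAS AND PROOFS =====

-- partition finds the separator iff the list contains it
theorem pvPartition_found (c : Char) (l : List Char) :
    (pvPartition c l).2.1 = l.contains c := by
  induction l with
  | nil => simp [pvPartition]
  | cons x xs ih =>
    by_cases hx : x = c
    · simp [pvPartition, hx]
    · simp [pvPartition, hx, ih, Ne.symm hx]

-- '?' in url  ==  url.toList.contains '?'
theorem pvIsIn_singleton (c : Char) (l : List Char) :
    PySem.Chars.isIn [c] l = l.contains c := by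
  by_cases h : c ∈ l
  · rw [List.contains_iff_mem.mpr h]
    obtain ⟨s, t, hst⟩ := List.append_of_mem h
    exact (PySem.Chars.isIn_iff_infix _ _).mpr ⟨s, t, by rw [hst]; simp⟩
  · have hc : l.contains c = false := by
      simp [List.contains_iff_mem, h]
    rw [hc]
    refine (PySem.Chars.isIn_eq_false_iff _ _).mpr (fun hinf => h ?_)
    exact hinf.subset (List.mem_singleton_self c)

-- proof-side characterisation of qs.split('&')
def pvSplitAux (pre : List Char) : List Char → List (List Char)
  | [] => [pre]
  | x :: xs => if x = '&' then pre :: pvSplitAux [] xs else pvSplitAux (pre ++ [x]) xs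

theorem pvSplitAux_ne_nil (pre l : List Char) : pvSplitAux pre l ≠ [] := by
  induction l generalizing pre with
  | nil => simp [pvSplitAux]
  | cons x xs ih =>
    by_cases hx : x = '&' <;> simp [pvSplitAux, hx, ih]

theorem pvGo_eq (fuel : Nat) (l cur : List Char) (acc : List (List Char))
    (h : l.length ≤ fuel) :
    PySem.Chars.splitOn.go ['&'] fuel l cur acc = acc.reverse ++ pvSplitAux cur.reverse l := by
  induction fuel generalizing l cur acc with
  | zero =>
    have : l = [] := List.length_eq_zero_iff.mp (Nat.le_zero.mp h)
    subst this
    simp [PySem.Chars.splitOn.go, pvSplitAux]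
  | succ n ih =>
    cases l with
    | nil => simp [PySem.Chars.splitOn.go, pvSplitAux]
    | cons x xs =>
      simp only [List.length_cons, Nat.succ_le_succ_iff] at h
      by_cases hx : x = '&'
      · subst hx
        rw [PySem.Chars.splitOn.go]
        simp only [List.isPrefixOf, BEq.rfl, Bool.true_and]
        rw [if_pos trivial, show List.drop ['&'].length ('&' :: xs) = xs from rfl,
          ih xs [] (cur.reverse :: acc) h]
        simp [pvSplitAux]
      · rw [PySem.Chars.splitOn.go]
        have hp : (['&'].isPrefixOf (x :: xs)) = false := by
          simp [List.isPrefixOf, Ne.symm hx]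
        rw [hp]
        simp only [Bool.false_eq_true, if_false]
        rw [ih xs (x :: cur) acc h]
        simp [pvSplitAux, hx]

theorem pvSplitOn_eq (qs : List Char) :
    PySem.Chars.splitOn qs ['&'] = pvSplitAux [] qs := by
  unfold PySem.Chars.splitOn
  rw [pvGo_eq _ _ _ _ (by omega)]
  simp

-- splitAux in terms of the partition at the next '&'
theorem pvSplitAux_partition (pre l : List Char) :
    pvSplitAux pre l =
      (pre ++ (pvPartition '&' l).1) ::
        (if (pvPartition '&' l).2.1 then pvSplitAux [] (pvPartition '&' l).2.2 else []) := by
  induction l generalizing pre with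
  | nil => simp [pvSplitAux, pvPartition]
  | cons x xs ih =>
    by_cases hx : x = '&'
    · simp [pvSplitAux, pvPartition, hx]
    · simp only [pvSplitAux, if_neg hx, pvPartition]
      rw [ih]
      simp [hx]

-- the per-part masking function both Pythons apply
def pvMaskPart (part : List Char) : List Char :=
  let q := pvPartition '=' part
  if q.2.1 && !q.2.2.isEmpty && PySem.Set.contains pvSensitive (PySem.Chars.lower q.1) then
    q.1 ++ ['=', '*', '*', '*']
  else part

-- A's join-of-masked-parts equals B's recursive _mask_qs
theorem pvJoin_map_eq_maskQs (qs : List Char) :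
    PySem.Chars.join ['&'] ((pvSplitAux [] qs).map pvMaskPart) = pvMaskQs qs := by
  rw [pvSplitAux_partition]
  rw [pvMaskQs]
  by_cases hf : (pvPartition '&' qs).2.1 = true
  · rw [if_pos hf]
    simp only [List.map_cons, List.nil_append]
    obtain ⟨a, t, hat⟩ := List.exists_cons_of_ne_nil (pvSplitAux_ne_nil [] (pvPartition '&' qs).2.2)
    rw [hat, List.map_cons, PySem.Chars.join_cons_cons, ← List.map_cons, ← hat]
    rw [pvJoin_map_eq_maskQs (pvPartition '&' qs).2.2]
    simp [pvMaskPart, hf]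
  · rw [if_neg hf]
    simp only [List.map_cons, List.map_nil, PySem.Chars.join_singleton, List.nil_append]
    simp [pvMaskPart, hf]
termination_by qs.length
decreasing_by exact pvPartition_rest_lt '&' qs hf

-- A's accumulate-into-a-list loop is map pvMaskPart
theorem pvFoldA_eq (l : List (List Char)) :
    l.foldl (fun acc part =>
        let q := pvPartition '=' part
        if q.2.1 && !q.2.2.isEmpty && PySem.Set.contains pvSensitive (PySem.Chars.lower q.1) then
          acc ++ [q.1 ++ ['=', '*', '*', '*']]
        else
          acc ++ [part]) [] = l.map pvMaskPart := by
  have he : (fun (acc : List (List Char)) part =>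
        let q := pvPartition '=' part
        if q.2.1 && !q.2.2.isEmpty && PySem.Set.contains pvSensitive (PySem.Chars.lower q.1) then
          acc ++ [q.1 ++ ['=', '*', '*', '*']]
        else
          acc ++ [part]) = fun acc part => acc ++ [pvMaskPart part] := by
    funext acc part
    simp only [pvMaskPart]
    split <;> rfl
  rw [he, PySem.List.foldl_append_singleton_eq_map]
  simp

-- ===== VERDICT (by name: the statement is the Claim_ definition above) =====
theorem mask_url_params_py_spec : Claim_equal_mask_url_params_py := by
  intro url _
  unfold Spec_mask_url_params_py mask_url_params_py mask_url_params_py_alt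
  have hq : PySem.Str.isIn "?" url = (pvPartition '?' url.toList).2.1 := by
    rw [pvPartition_found, ← pvIsIn_singleton]
    simp
  by_cases h : (pvPartition '?' url.toList).2.1 = true
  · rw [hq, h, if_neg (by simp), if_neg (by simp [h])]
    simp only []
    rw [pvSplitOn_eq, pvFoldA_eq, pvJoin_map_eq_maskQs]
  · rw [hq]
    have hf : (pvPartition '?' url.toList).2.1 = false := by
      cases hb : (pvPartition '?' url.toList).2.1 <;> simp_all
    rw [hf]
    simp [hf]
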